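-- pv_equiv track=rewrite | github.com/dmehrotra/uber-ocr | ocr/parse.py | try_order_u
-- ===== SOURCE A (Python) =====
-- def try_order_u(content):
-- 	line_index = None
-- 	for l in content:
-- 		if line_index == None:
-- 			if "Uber Receives" in l:
-- 				line_index = content.index(l)
-- 		else:
-- 			if "Total" in l:
-- 				return l.split("Total")[1].strip()
-- ===== SOURCE B (Python) =====
-- def try_order_u(content):
--     for j, line in enumerate(content):
--         if "Total" in line and any("Uber Receives" in m for m in content[:j]):
--             return line.split("Total")[1].strip()
--     return None
-- ===== Notes on version B (the rewrite author's own statement) =====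
-- stated objective: alternative
-- what changed: A's stateful single pass (flag set at the first 'Uber Receives' line, then watch for 'Total') is replaced by a per-line criterion with no loop state: return the first 'Total' line whose strict prefix content[:j] contains an 'Uber Receives' line, checked by a nested any-scan.
import Mathlib
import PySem

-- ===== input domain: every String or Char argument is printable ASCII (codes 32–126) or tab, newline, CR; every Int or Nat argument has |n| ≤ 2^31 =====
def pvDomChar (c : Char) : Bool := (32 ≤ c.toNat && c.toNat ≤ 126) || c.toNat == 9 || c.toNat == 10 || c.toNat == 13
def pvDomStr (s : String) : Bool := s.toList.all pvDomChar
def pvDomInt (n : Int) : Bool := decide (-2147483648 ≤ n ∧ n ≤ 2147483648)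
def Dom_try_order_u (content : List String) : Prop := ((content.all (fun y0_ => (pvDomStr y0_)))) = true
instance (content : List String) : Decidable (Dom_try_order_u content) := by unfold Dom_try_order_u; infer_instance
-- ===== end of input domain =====

-- B drops A's loop state: it returns the first "Total" line preceded by an "Uber Receives" line, via a nested prefix scan (objective: alternative).


-- ===== PORT A =====
-- l.split("Total")[1].strip() ; split? is some (sep ≠ ""), pyGet? is some whenever "Total" ∈ l
def pvExtract (l : String) : Option String :=
  match PySem.Str.split? l "Total" with
  | some parts => (PySem.List.pyGet? parts 1).map PySem.Str.strip
  | none => none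

-- A's single loop: line_index is None until a "Uber Receives" line is seen (then content.index(l)),
-- afterwards the first "Total" line returns the extracted value.
def pvLoopA (content : List String) : Option Nat → List String → Option String
  | _, [] => none
  | none, l :: rest =>
      if PySem.Str.isIn "Uber Receives" l then pvLoopA content (PySem.List.index? content l) rest
      else pvLoopA content none rest
  | some j, l :: rest =>
      if PySem.Str.isIn "Total" l then pvExtract l
      else pvLoopA content (some j) rest

def try_order_u (content : List String) : Option String :=
  pvLoopA content none content

-- ===== PORT B =====
-- any("Uber Receives" in m for m in prefix)
def pvAnyMarker : List String → Bool
  | [] => false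
  | m :: rest => if PySem.Str.isIn "Uber Receives" m then true else pvAnyMarker rest

-- for j, line in enumerate(content): if "Total" in line and any(... for m in content[:j]): return ...
def pvLoopB (content : List String) : List (Int × String) → Option String
  | [] => none
  | (j, l) :: rest =>
      if PySem.Str.isIn "Total" l && pvAnyMarker (PySem.List.slice content none (some j)) then
        pvExtract l
      else pvLoopB content rest

def try_order_u_alt (content : List String) : Option String :=
  pvLoopB content (PySem.List.enumerate content 0)

-- ===== PRECONDITION & SPEC =====
def Spec_try_order_u (content : List String) (out : Option String) : Prop := out = try_order_u_alt content
instance (content : List String) (out : Option String) : Decidable (Spec_try_order_u content out) := by unfold Spec_try_order_u; infer_instance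

-- ===== CLAIM =====
def Claim_equal_try_order_u : Prop := ∀ (content : List String), Dom_try_order_u content → Spec_try_order_u content (try_order_u content)

-- ===== LEMMAS AND PROOFS =====

-- scan for the first "Total" line (the post-marker phase of both programs)
def pvFindTotal : List String → Option String
  | [] => none
  | l :: rest => if PySem.Str.isIn "Total" l then pvExtract l else pvFindTotal rest

-- reference shape both ports reduce to
def pvRef : List String → Option String
  | [] => none
  | l :: rest => if PySem.Str.isIn "Uber Receives" l then pvFindTotal rest else pvRef rest

lemma pvAnyMarker_append_singleton (xs : List String) (l : String) :
    pvAnyMarker (xs ++ [l]) = (pvAnyMarker xs || PySem.Str.isIn "Uber Receives" l) := by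
  induction xs with
  | nil => simp [pvAnyMarker]
  | cons m t ih =>
      simp only [List.cons_append, pvAnyMarker, ih]
      simp [Bool.or_assoc]

-- once the marker is found, A's loop is exactly the "Total" scan
lemma pvLoopA_some (content : List String) (j : Nat) :
    ∀ rest, pvLoopA content (some j) rest = pvFindTotal rest := by
  intro rest
  induction rest with
  | nil => rfl
  | cons l t ih => simp only [pvLoopA, pvFindTotal, ih]

-- A's loop from state None equals the reference, whenever every scanned line is in content
lemma pvLoopA_none (content : List String) :
    ∀ rest, (∀ x ∈ rest, x ∈ content) → pvLoopA content none rest = pvRef rest := by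
  intro rest
  induction rest with
  | nil => intro _; rfl
  | cons l t ih =>
      intro h
      simp only [pvLoopA, pvRef]
      by_cases hm : PySem.Str.isIn "Uber Receives" l = true
      · have hmem : l ∈ content := h l (List.mem_cons_self ..)
        obtain ⟨j, hj⟩ := Option.isSome_iff_exists.mp
          ((PySem.List.index?_isSome_iff content l).mpr hmem)
        rw [if_pos hm, if_pos hm, hj, pvLoopA_some]
      · rw [if_neg hm, if_neg hm, ih (fun x hx => h x (List.mem_cons_of_mem _ hx))]

-- B's loop over the suffix, with the processed prefix made explicit
lemma pvLoopB_inv : ∀ (suf pre : List String),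
    pvLoopB (pre ++ suf) (PySem.List.enumerate suf (pre.length : Int)) =
      if pvAnyMarker pre then pvFindTotal suf else pvRef suf := by
  intro suf
  induction suf with
  | nil => intro pre; cases h : pvAnyMarker pre <;> simp [pvLoopB, pvFindTotal, pvRef]
  | cons l t ih =>
      intro pre
      rw [PySem.List.enumerate_cons]
      simp only [pvLoopB]
      rw [PySem.List.slice_to_natCast, List.take_left]
      have harg : pre ++ l :: t = (pre ++ [l]) ++ t := by simp
      have hlen : ((pre.length : Int) + 1) = (((pre ++ [l]).length : Int)) := by
        simp
      rw [harg, hlen, ih (pre ++ [l]), pvAnyMarker_append_singleton]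
      by_cases hp : pvAnyMarker pre = true
      · simp [hp, pvFindTotal]
      · simp [hp, pvRef]

-- ===== VERDICT =====
theorem try_order_u_spec : Claim_equal_try_order_u := by
  intro content _
  unfold Spec_try_order_u try_order_u try_order_u_alt
  have h := pvLoopB_inv content []
  simp only [List.nil_append, List.length_nil, Nat.cast_zero, pvAnyMarker,
    Bool.false_eq_true, if_false] at h
  rw [h]
  exact pvLoopA_none content content (fun x hx => hx)
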